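-- pv_equiv track=rewrite | github.com/syedmdfarhaneazam/AgenticAI_UI | backend/main.py | isADag
-- ===== SOURCE A (Python) =====
-- def isADag(graph):
--     visited = set()
--     stack = set()
--     def dfs(node):
--         visited.add(node)
--         stack.add(node)
--         for neighbor in graph.get(node, []):
--             if neighbor not in visited:
--                 if dfs(neighbor):
--                     return True
--             elif neighbor in stack:
--                 return True
--         stack.remove(node)
--         return False
--     for node in graph:
--         if node not in visited:
--             if dfs(node):
--                 return False
--     return True
-- ===== SOURCE B (Python) =====
-- def isADag(graph):
--     nodes = set(graph)
--     for nbrs in graph.values():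
--         nodes |= set(nbrs)
--     remaining = nodes
--     while remaining:
--         targets = {u for v in remaining for u in graph.get(v, [])}
--         removable = remaining - targets
--         if not removable:
--             return False
--         remaining -= removable
--     return True
-- ===== Notes on version B (the rewrite author's own statement) =====
-- stated objective: alternative
-- what changed: Replaces the recursive three-colour DFS cycle search by iterative source elimination (a layered Kahn variant): build the node universe (keys plus all listed neighbours), then repeatedly delete the whole set of remaining nodes that no remaining node points at; the graph is a DAG iff every node eventually gets deleted.
import Mathlib
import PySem

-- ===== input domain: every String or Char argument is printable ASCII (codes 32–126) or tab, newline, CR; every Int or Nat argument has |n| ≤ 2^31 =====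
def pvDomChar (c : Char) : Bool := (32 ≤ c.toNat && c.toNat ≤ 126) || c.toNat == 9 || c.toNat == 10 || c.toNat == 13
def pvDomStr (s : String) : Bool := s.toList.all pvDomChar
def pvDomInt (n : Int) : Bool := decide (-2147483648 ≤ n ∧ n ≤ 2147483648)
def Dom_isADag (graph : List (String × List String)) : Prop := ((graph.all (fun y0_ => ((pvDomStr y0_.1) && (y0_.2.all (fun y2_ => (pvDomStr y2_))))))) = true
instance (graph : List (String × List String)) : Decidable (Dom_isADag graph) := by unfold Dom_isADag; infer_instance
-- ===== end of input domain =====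

-- B changes the algorithm, not the behaviour: iterative source elimination instead of A's
-- recursive DFS cycle search; equal return value on every input.

-- ===== PORT A =====
-- `graph.get(node, [])` (the association list is read as the Python dict it denotes).
def adjOf (graph : List (String × List String)) (node : String) : List String :=
  (PySem.Dict.ofList graph).getD node []

-- All node occurrences (keys and listed neighbours); its length bounds the depth of A's
-- recursion and serves as fuel for `dfsA` (the fuel is never exhausted: each nested call
-- visits a previously unvisited node).
def univList (graph : List (String × List String)) : List String :=
  (PySem.Dict.ofList graph).keys ++ ((PySem.Dict.ofList graph).values).flatten

mutual
-- literal port of A's inner `dfs`; `visited`/`stack` are threaded as values and returned.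
def dfsA (graph : List (String × List String)) (fuel : Nat) (node : String)
    (V S : Finset String) : Bool × Finset String × Finset String :=
  match fuel with
  | 0 => (false, V, S)      -- unreachable guard making the recursion total
  | f + 1 => dfsGoA graph f node (adjOf graph node) (insert node V) (insert node S)
termination_by (fuel, 0)
-- the `for neighbor in graph.get(node, [])` loop of A's `dfs`.
def dfsGoA (graph : List (String × List String)) (fuel : Nat) (node : String)
    (l : List String) (V S : Finset String) : Bool × Finset String × Finset String :=
  match l with
  | [] => (false, V, S.erase node)
  | nb :: rest =>
    if nb ∉ V then
      match dfsA graph fuel nb V S with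
      | (true, V', S') => (true, V', S')
      | (false, V', S') => dfsGoA graph fuel node rest V' S'
    else if nb ∈ S then (true, V, S)
    else dfsGoA graph fuel node rest V S
termination_by (fuel, l.length + 1)
end

-- A's outer `for node in graph` loop.
def loopA (graph : List (String × List String)) (fuel : Nat) :
    List String → Finset String → Finset String → Bool
  | [], _, _ => true
  | k :: rest, V, S =>
    if k ∉ V then
      match dfsA graph fuel k V S with
      | (true, _, _) => false
      | (false, V', S') => loopA graph fuel rest V' S'
    else loopA graph fuel rest V S

def isADag (graph : List (String × List String)) : Bool :=
  loopA graph ((univList graph).length + 1) (PySem.Dict.ofList graph).keys ∅ ∅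

-- ===== PORT B =====
-- `nodes = set(graph); for nbrs in graph.values(): nodes |= set(nbrs)`
def nodesB (graph : List (String × List String)) : Finset String :=
  ((PySem.Dict.ofList graph).values).foldl (fun acc nbrs => acc ∪ nbrs.toFinset)
    ((PySem.Dict.ofList graph).keys).toFinset

-- B's `while remaining:` loop: drop the set of nodes with no incoming edge from `remaining`
-- (`targets` = every node some remaining node points at).
def peelB (graph : List (String × List String)) (remaining : Finset String) : Bool :=
  if remaining = ∅ then true
  else
    let removable := remaining \ remaining.biUnion (fun v => (adjOf graph v).toFinset)
    if hne : removable = ∅ then false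
    else peelB graph (remaining \ removable)
termination_by remaining.card
decreasing_by
  exact Finset.card_lt_card
    (Finset.sdiff_ssubset Finset.sdiff_subset
      (Finset.nonempty_iff_ne_empty.mpr hne))

def isADag_alt (graph : List (String × List String)) : Bool :=
  peelB graph (nodesB graph)

-- ===== PRECONDITION & SPEC =====
def Spec_isADag (graph : List (String × List String)) (out : Bool) : Prop := out = isADag_alt graph
instance (graph : List (String × List String)) (out : Bool) : Decidable (Spec_isADag graph out) := by unfold Spec_isADag; infer_instance

-- ===== CLAIM (what is proved, stated in full; the proofs are below) =====
def Claim_equal_isADag : Prop := ∀ (graph : List (String × List String)), Dom_isADag graph → Spec_isADag graph (isADag graph)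

-- ===== LEMMAS AND PROOFS =====

-- The edge relation of the graph, and the cycle property both programs decide.
def Edg (g : List (String × List String)) (x y : String) : Prop := y ∈ adjOf g x

def Cyc (g : List (String × List String)) : Prop := ∃ x, Relation.TransGen (Edg g) x x

-- the finite universe of nodes
def UF (g : List (String × List String)) : Finset String := (univList g).toFinset

-- invariant of the set of finished ("black") nodes
def GoodB (g : List (String × List String)) (B : Finset String) : Prop :=
  (∀ x ∈ B, ∀ y, Edg g x y → y ∈ B) ∧ (∀ x ∈ B, ¬ Relation.TransGen (Edg g) x x)

theorem edg_key_univ {g : List (String × List String)} {x y : String} (h : Edg g x y) :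
    x ∈ (PySem.Dict.ofList g).keys ∧ y ∈ UF g := by
  unfold Edg adjOf at h
  rcases hget : (PySem.Dict.ofList g).get? x with _ | l
  · rw [PySem.Dict.getD, hget] at h; simp at h
  · rw [PySem.Dict.getD, hget] at h
    simp only [Option.getD_some] at h
    rw [PySem.Dict.get?] at hget
    rcases Option.map_eq_some_iff.mp hget with ⟨p, hfind, hp2⟩
    have hmem := List.mem_of_find?_eq_some hfind
    have hpred := List.find?_some hfind
    have hp1 : p.1 = x := by simpa using hpred
    constructor
    · simp only [PySem.Dict.keys]
      exact hp1 ▸ List.mem_map_of_mem hmem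
    · unfold UF univList
      rw [List.mem_toFinset, List.mem_append]
      right
      exact List.mem_flatten.mpr ⟨p.2, by
        simp only [PySem.Dict.values]
        exact List.mem_map_of_mem hmem, hp2 ▸ h⟩

theorem edg_univ {g : List (String × List String)} {x y : String} (h : Edg g x y) :
    x ∈ UF g ∧ y ∈ UF g := by
  rcases edg_key_univ h with ⟨hx, hy⟩
  refine ⟨?_, hy⟩
  unfold UF univList
  rw [List.mem_toFinset, List.mem_append]
  exact Or.inl hx

theorem goodB_rtg {g : List (String × List String)} {B : Finset String} (hB : GoodB g B)
    {x y : String} (hx : x ∈ B) (hxy : Relation.ReflTransGen (Edg g) x y) : y ∈ B := by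
  induction hxy with
  | refl => exact hx
  | tail _ h ih => exact hB.1 _ ih _ h

-- ---- A side: stack restoration ----
def SRA (g : List (String × List String)) (f : Nat) : Prop :=
  ∀ node V S V' S', dfsA g f node V S = (false, V', S') → S ⊆ V → node ∉ V →
    S' = S ∧ V ⊆ V'

def SRG (g : List (String × List String)) (f : Nat) : Prop :=
  ∀ node l V S V' S', dfsGoA g f node l V S = (false, V', S') → S ⊆ V → node ∈ S →
    S' = S.erase node ∧ V ⊆ V'

theorem srg_of_sra {g : List (String × List String)} {f : Nat} (hA : SRA g f) : SRG g f := by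
  intro node l
  induction l with
  | nil =>
    intro V S V' S' heq hSV hnode
    rw [dfsGoA] at heq
    simp only [Prod.mk.injEq] at heq
    exact ⟨heq.2.2.symm, heq.2.1 ▸ subset_rfl⟩
  | cons nb rest ih =>
    intro V S V' S' heq hSV hnode
    rw [dfsGoA] at heq
    by_cases hv : nb ∈ V
    · rw [if_neg (by simpa using hv)] at heq
      by_cases hs : nb ∈ S
      · rw [if_pos hs] at heq
        exact absurd (congrArg Prod.fst heq) (by simp)
      · rw [if_neg hs] at heq
        exact ih V S V' S' heq hSV hnode
    · rw [if_pos hv] at heq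
      rcases hr : dfsA g f nb V S with ⟨b, V'', S''⟩
      rw [hr] at heq
      cases b
      · obtain ⟨hS'', hVV''⟩ := hA nb V S V'' S'' hr hSV hv
        rw [hS''] at heq
        obtain ⟨h1, h2⟩ := ih V'' S V' S' heq (hSV.trans hVV'') hnode
        exact ⟨h1, hVV''.trans h2⟩
      · exact absurd (congrArg Prod.fst heq) (by simp)

theorem sra_all (g : List (String × List String)) : ∀ f, SRA g f := by
  intro f
  induction f with
  | zero =>
    intro node V S V' S' heq hSV hnode
    rw [dfsA] at heq
    simp only [Prod.mk.injEq] at heq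
    exact ⟨heq.2.2.symm, heq.2.1 ▸ subset_rfl⟩
  | succ f ih =>
    intro node V S V' S' heq hSV hnode
    rw [dfsA] at heq
    obtain ⟨h1, h2⟩ := srg_of_sra ih node (adjOf g node) (insert node V) (insert node S) V' S'
      heq (Finset.insert_subset_insert _ hSV) (Finset.mem_insert_self _ _)
    refine ⟨?_, (Finset.subset_insert node V).trans h2⟩
    rw [h1]
    exact Finset.erase_insert (fun hS => hnode (hSV hS))

-- ---- A side: soundness (returning `true` exhibits a cycle) ----
def SA (g : List (String × List String)) (f : Nat) : Prop :=
  ∀ node V S, S ⊆ V → (∀ s ∈ S, Relation.ReflTransGen (Edg g) s node) →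
    (dfsA g f node V S).1 = true → Cyc g

def SG (g : List (String × List String)) (f : Nat) : Prop :=
  ∀ node l V S, S ⊆ V → node ∈ S → (∀ s ∈ S, Relation.ReflTransGen (Edg g) s node) →
    (∀ nb ∈ l, Edg g node nb) → (dfsGoA g f node l V S).1 = true → Cyc g

theorem sg_of_sa {g : List (String × List String)} {f : Nat} (hA : SA g f) : SG g f := by
  intro node l
  induction l with
  | nil =>
    intro V S hSV hnode hrtg hnb htrue
    rw [dfsGoA] at htrue
    simp at htrue
  | cons nb rest ih =>
    intro V S hSV hnode hrtg hnb htrue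
    rw [dfsGoA] at htrue
    by_cases hv : nb ∈ V
    · by_cases hs : nb ∈ S
      · exact ⟨node, Relation.TransGen.head' (hnb nb (by simp)) (hrtg nb hs)⟩
      · rw [if_neg (by simpa using hv), if_neg hs] at htrue
        exact ih V S hSV hnode hrtg (fun x hx => hnb x (by simp [hx])) htrue
    · rw [if_pos hv] at htrue
      rcases hr : dfsA g f nb V S with ⟨b, V'', S''⟩
      rw [hr] at htrue
      cases b
      · obtain ⟨hS'', hVV''⟩ := sra_all g f nb V S V'' S'' hr hSV hv
        rw [hS''] at htrue
        exact ih V'' S (hSV.trans hVV'') hnode hrtg (fun x hx => hnb x (by simp [hx])) htrue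
      · exact hA nb V S hSV (fun s hs => (hrtg s hs).tail (hnb nb (by simp))) (by rw [hr])

theorem sa_all (g : List (String × List String)) : ∀ f, SA g f := by
  intro f
  induction f with
  | zero =>
    intro node V S hSV hrtg htrue
    rw [dfsA] at htrue
    simp at htrue
  | succ f ih =>
    intro node V S hSV hrtg htrue
    rw [dfsA] at htrue
    refine sg_of_sa ih node (adjOf g node) (insert node V) (insert node S)
      (Finset.insert_subset_insert _ hSV) (Finset.mem_insert_self _ _) ?_ (fun nb h => h) htrue
    intro s hs
    rcases Finset.mem_insert.mp hs with rfl | hs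
    · exact Relation.ReflTransGen.refl
    · exact hrtg s hs

-- ---- A side: completeness (returning `false` keeps the black-set invariant) ----
def CA (g : List (String × List String)) (f : Nat) : Prop :=
  ∀ node V S V' S', S ⊆ V → node ∉ V → node ∈ UF g → (UF g \ V).card < f →
    GoodB g (V \ S) → dfsA g f node V S = (false, V', S') →
    S' = S ∧ insert node V ⊆ V' ∧ GoodB g (V' \ S)

def CG (g : List (String × List String)) (f : Nat) : Prop :=
  ∀ node l V S V' S', S ⊆ V → node ∈ S → (∀ nb ∈ l, Edg g node nb) →
    (UF g \ V).card < f → GoodB g (V \ S) → dfsGoA g f node l V S = (false, V', S') →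
    S' = S.erase node ∧ V ⊆ V' ∧ GoodB g (V' \ S) ∧ (∀ nb ∈ l, nb ∈ V' ∧ nb ∉ S)

theorem cg_of_ca {g : List (String × List String)} {f : Nat} (hA : CA g f) : CG g f := by
  intro node l
  induction l with
  | nil =>
    intro V S V' S' hSV hnode hnb hcard hGood heq
    rw [dfsGoA] at heq
    simp only [Prod.mk.injEq] at heq
    exact ⟨heq.2.2.symm, heq.2.1 ▸ subset_rfl, heq.2.1 ▸ hGood, by simp⟩
  | cons nb rest ih =>
    intro V S V' S' hSV hnode hnb hcard hGood heq
    rw [dfsGoA] at heq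
    by_cases hv : nb ∈ V
    · by_cases hs : nb ∈ S
      · rw [if_neg (by simpa using hv), if_pos hs] at heq
        exact absurd (congrArg Prod.fst heq) (by simp)
      · rw [if_neg (by simpa using hv), if_neg hs] at heq
        obtain ⟨h1, h2, h3, h4⟩ := ih V S V' S' hSV hnode
          (fun x hx => hnb x (List.mem_cons_of_mem _ hx)) hcard hGood heq
        refine ⟨h1, h2, h3, fun x hx => ?_⟩
        rcases List.mem_cons.mp hx with rfl | hx
        · exact ⟨h2 hv, hs⟩
        · exact h4 x hx
    · rw [if_pos hv] at heq
      rcases hr : dfsA g f nb V S with ⟨b, V'', S''⟩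
      rw [hr] at heq
      cases b
      · have hnbU : nb ∈ UF g := (edg_univ (hnb nb List.mem_cons_self)).2
        obtain ⟨hS'', hins, hGood''⟩ := hA nb V S V'' S'' hSV hv hnbU hcard hGood hr
        rw [hS''] at heq
        have hVsub : V ⊆ V'' := (Finset.subset_insert nb V).trans hins
        have hcard'' : (UF g \ V'').card < f :=
          lt_of_le_of_lt (Finset.card_le_card (Finset.sdiff_subset_sdiff subset_rfl hVsub)) hcard
        obtain ⟨h1, h2, h3, h4⟩ := ih V'' S V' S' (hSV.trans hVsub) hnode
          (fun x hx => hnb x (List.mem_cons_of_mem _ hx)) hcard'' hGood'' heq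
        refine ⟨h1, hVsub.trans h2, h3, fun x hx => ?_⟩
        rcases List.mem_cons.mp hx with rfl | hx
        · exact ⟨h2 (hins (Finset.mem_insert_self _ _)), fun hxS => hv (hSV hxS)⟩
        · exact h4 x hx
      · exact absurd (congrArg Prod.fst heq) (by simp)

theorem ca_all (g : List (String × List String)) : ∀ f, CA g f := by
  intro f
  induction f with
  | zero =>
    intro node V S V' S' hSV hnv hnU hcard hGood heq
    exact absurd hcard (Nat.not_lt_zero _)
  | succ f ih =>
    intro node V S V' S' hSV hnv hnU hcard hGood heq
    rw [dfsA] at heq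
    have hnVS : node ∈ UF g \ V := Finset.mem_sdiff.mpr ⟨hnU, hnv⟩
    have hcard1 : (UF g \ insert node V).card < f := by
      have hE : UF g \ insert node V = (UF g \ V).erase node := by
        ext x
        simp only [Finset.mem_sdiff, Finset.mem_erase, Finset.mem_insert]
        tauto
      rw [hE, Finset.card_erase_of_mem hnVS]
      have hpos : 0 < (UF g \ V).card := Finset.card_pos.mpr ⟨node, hnVS⟩
      omega
    have hBlkEq : insert node V \ insert node S = V \ S := by
      ext x
      simp only [Finset.mem_sdiff, Finset.mem_insert, not_or]
      constructor
      · rintro ⟨h1, h2, h3⟩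
        exact ⟨h1.resolve_left h2, h3⟩
      · rintro ⟨h1, h2⟩
        exact ⟨Or.inr h1, fun e => hnv (e ▸ h1), h2⟩
    obtain ⟨h1, h2, h3, h4⟩ := cg_of_ca ih node (adjOf g node) (insert node V) (insert node S)
      V' S' (Finset.insert_subset_insert _ hSV) (Finset.mem_insert_self _ _)
      (fun nb h => h) hcard1 (hBlkEq.symm ▸ hGood) heq
    have hS' : S' = S := by
      rw [h1, Finset.erase_insert (fun hS => hnv (hSV hS))]
    have hnodeV' : node ∈ V' := h2 (Finset.mem_insert_self _ _)
    have hsplit : V' \ S = insert node (V' \ insert node S) := by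
      ext x
      simp only [Finset.mem_sdiff, Finset.mem_insert, not_or]
      constructor
      · rintro ⟨hx1, hx2⟩
        by_cases hxn : x = node
        · exact Or.inl hxn
        · exact Or.inr ⟨hx1, hxn, hx2⟩
      · rintro (rfl | ⟨hx1, hx2, hx3⟩)
        · exact ⟨hnodeV', fun hS => hnv (hSV hS)⟩
        · exact ⟨hx1, hx3⟩
    refine ⟨hS', h2, ?_⟩
    rw [hsplit]
    constructor
    · intro x hx y hxy
      rcases Finset.mem_insert.mp hx with rfl | hx
      · have hy := h4 y hxy
        exact Finset.mem_insert_of_mem (Finset.mem_sdiff.mpr hy)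
      · exact Finset.mem_insert_of_mem (h3.1 x hx y hxy)
    · intro x hx hcyc
      rcases Finset.mem_insert.mp hx with rfl | hx
      · obtain ⟨c, hxc, hcx⟩ := Relation.TransGen.head'_iff.mp hcyc
        have hcB : c ∈ V' \ insert x S := Finset.mem_sdiff.mpr (h4 c hxc)
        have hxB := goodB_rtg h3 hcB hcx
        exact (Finset.mem_sdiff.mp hxB).2 (Finset.mem_insert_self _ _)
      · exact h3.2 x hx hcyc

-- ---- A side: the outer loop ----
theorem loopA_sound {g : List (String × List String)} {F : Nat} :
    ∀ keys V, loopA g F keys V ∅ = false → Cyc g := by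
  intro keys
  induction keys with
  | nil => intro V h; simp [loopA] at h
  | cons k rest ih =>
    intro V h
    rw [loopA] at h
    by_cases hv : k ∈ V
    · rw [if_neg (by simpa using hv)] at h
      exact ih _ h
    · rw [if_pos hv] at h
      rcases hr : dfsA g F k V ∅ with ⟨b, V', S'⟩
      rw [hr] at h
      cases b
      · obtain ⟨hS', -⟩ := sra_all g F k V ∅ V' S' hr (Finset.empty_subset V) hv
        rw [hS'] at h
        exact ih V' h
      · exact sa_all g F k V ∅ (Finset.empty_subset V) (by simp) (by rw [hr])

theorem loopA_complete {g : List (String × List String)} {F : Nat} :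
    ∀ keys V, (∀ k ∈ keys, k ∈ UF g) → (UF g \ V).card < F → GoodB g V →
      (∀ x, Relation.TransGen (Edg g) x x → x ∈ keys ∨ x ∈ V) →
      loopA g F keys V ∅ = true → ¬ Cyc g := by
  intro keys
  induction keys with
  | nil =>
    intro V hkeys hcard hGood hloc htrue
    rintro ⟨x, hx⟩
    rcases hloc x hx with h | h
    · simp at h
    · exact hGood.2 x h hx
  | cons k rest ih =>
    intro V hkeys hcard hGood hloc htrue
    rw [loopA] at htrue
    by_cases hv : k ∈ V
    · rw [if_neg (by simpa using hv)] at htrue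
      refine ih V (fun x hx => hkeys x (List.mem_cons_of_mem _ hx)) hcard hGood ?_ htrue
      intro x hx
      rcases hloc x hx with h | h
      · rcases List.mem_cons.mp h with rfl | h
        · exact Or.inr hv
        · exact Or.inl h
      · exact Or.inr h
    · rw [if_pos hv] at htrue
      rcases hr : dfsA g F k V ∅ with ⟨b, V', S'⟩
      rw [hr] at htrue
      cases b
      · obtain ⟨hS', hins, hGood'⟩ := ca_all g F k V ∅ V' S' (Finset.empty_subset V) hv
          (hkeys k List.mem_cons_self) hcard (by simpa using hGood) hr
        rw [hS'] at htrue
        have hVsub : V ⊆ V' := (Finset.subset_insert k V).trans hins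
        refine ih V' (fun x hx => hkeys x (List.mem_cons_of_mem _ hx))
          (lt_of_le_of_lt (Finset.card_le_card (Finset.sdiff_subset_sdiff subset_rfl hVsub)) hcard)
          (by simpa using hGood') ?_ htrue
        intro x hx
        rcases hloc x hx with h | h
        · rcases List.mem_cons.mp h with rfl | h
          · exact Or.inr (hins (Finset.mem_insert_self _ _))
          · exact Or.inl h
        · exact Or.inr (hVsub h)
      · cases htrue

theorem isADag_iff (g : List (String × List String)) : isADag g = true ↔ ¬ Cyc g := by
  constructor
  · intro ht
    unfold isADag at ht
    refine loopA_complete (PySem.Dict.ofList g).keys ∅ ?_ ?_ ⟨by simp, by simp⟩ ?_ ht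
    · intro k hk
      unfold UF univList
      rw [List.mem_toFinset, List.mem_append]
      exact Or.inl hk
    · have h1 : (UF g \ ∅).card ≤ (univList g).length := by
        rw [Finset.sdiff_empty]
        exact List.toFinset_card_le _
      omega
    · intro x hx
      obtain ⟨c, hxc, -⟩ := Relation.TransGen.head'_iff.mp hx
      exact Or.inl (edg_key_univ hxc).1
  · intro hnc
    cases hA : isADag g
    · unfold isADag at hA
      exact absurd (loopA_sound _ _ hA) hnc
    · rfl

-- ---- B side ----
theorem foldl_union_toFinset (ls : List (List String)) (init : Finset String) :
    ls.foldl (fun acc nbrs => acc ∪ nbrs.toFinset) init = init ∪ ls.flatten.toFinset := by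
  induction ls generalizing init with
  | nil => simp
  | cons l ls ih =>
    simp only [List.foldl_cons, List.flatten_cons, ih, List.toFinset_append]
    rw [Finset.union_assoc]

theorem nodesB_eq_UF (g : List (String × List String)) : nodesB g = UF g := by
  unfold nodesB UF univList
  rw [foldl_union_toFinset, List.toFinset_append]

theorem peelB_sound {g : List (String × List String)} :
    ∀ R : Finset String, peelB g R = true →
      (∀ x, Relation.TransGen (Edg g) x x → x ∈ R) → ¬ Cyc g := by
  have H : ∀ n (R : Finset String), R.card ≤ n → peelB g R = true →
      (∀ x, Relation.TransGen (Edg g) x x → x ∈ R) → ¬ Cyc g := by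
    intro n
    induction n with
    | zero =>
      intro R hn _ hinv
      rintro ⟨x, hx⟩
      have hR : R = ∅ := Finset.card_eq_zero.mp (Nat.le_zero.mp hn)
      exact absurd (hinv x hx) (by simp [hR])
    | succ n ih =>
      intro R hn ht hinv
      by_cases hR : R = ∅
      · rintro ⟨x, hx⟩
        exact absurd (hinv x hx) (by simp [hR])
      · rw [peelB, if_neg hR] at ht
        by_cases h0 : R \ R.biUnion (fun v => (adjOf g v).toFinset) = ∅
        · rw [dif_pos h0] at ht
          cases ht
        · rw [dif_neg h0] at ht
          have hlt := Finset.card_lt_card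
            (Finset.sdiff_ssubset Finset.sdiff_subset (Finset.nonempty_iff_ne_empty.mpr h0))
          refine ih _ (by omega) ht ?_
          intro x hx
          refine Finset.mem_sdiff.mpr ⟨hinv x hx, fun hxrem => ?_⟩
          have hall := (Finset.mem_sdiff.mp hxrem).2
          obtain ⟨b, hxb, hbx⟩ := Relation.TransGen.tail'_iff.mp hx
          have hbcyc : Relation.TransGen (Edg g) b b := Relation.TransGen.head' hbx hxb
          exact hall (Finset.mem_biUnion.mpr ⟨b, hinv b hbcyc, List.mem_toFinset.mpr hbx⟩)
  intro R
  exact H R.card R le_rfl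

theorem peelB_complete {g : List (String × List String)} (hnc : ¬ Cyc g) :
    ∀ R : Finset String, peelB g R = true := by
  have H : ∀ n (R : Finset String), R.card ≤ n → peelB g R = true := by
    intro n
    induction n with
    | zero =>
      intro R hn
      rw [peelB, if_pos (Finset.card_eq_zero.mp (Nat.le_zero.mp hn))]
    | succ n ih =>
      intro R hn
      by_cases hR : R = ∅
      · rw [peelB, if_pos hR]
      · rw [peelB, if_neg hR]
        by_cases h0 : R \ R.biUnion (fun v => (adjOf g v).toFinset) = ∅
        · exfalso
          have hpred : ∀ u ∈ R, ∃ v ∈ R, u ∈ adjOf g v := by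
            intro u hu
            by_contra hno
            push Not at hno
            have hmem : u ∈ R \ R.biUnion (fun v => (adjOf g v).toFinset) := by
              refine Finset.mem_sdiff.mpr ⟨hu, fun hbi => ?_⟩
              obtain ⟨v, hv, hmv⟩ := Finset.mem_biUnion.mp hbi
              exact hno v hv (List.mem_toFinset.mp hmv)
            rw [h0] at hmem
            simp at hmem
          classical
          let f : String → String := fun u => if h : u ∈ R then (hpred u h).choose else u
          have hf : ∀ u ∈ R, f u ∈ R ∧ u ∈ adjOf g (f u) := by
            intro u hu
            simp only [f, dif_pos hu]
            exact ⟨(hpred u hu).choose_spec.1, (hpred u hu).choose_spec.2⟩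
          have hiter : ∀ (k : Nat) (u : String), u ∈ R →
              f^[k] u ∈ R ∧ (0 < k → Relation.TransGen (Edg g) (f^[k] u) u) := by
            intro k
            induction k with
            | zero => exact fun u hu => ⟨hu, fun h => absurd h (lt_irrefl 0)⟩
            | succ k ihk =>
              intro u hu
              rw [Function.iterate_succ_apply']
              obtain ⟨hw, htg⟩ := ihk u hu
              obtain ⟨hfR, hedge⟩ := hf _ hw
              refine ⟨hfR, fun _ => ?_⟩
              have hstep : Edg g (f (f^[k] u)) (f^[k] u) := hedge
              rcases Nat.eq_zero_or_pos k with h0' | hpos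
              · subst h0'
                simpa using Relation.TransGen.single hstep
              · exact Relation.TransGen.head hstep (htg hpos)
          obtain ⟨u₀, hu₀⟩ := Finset.nonempty_iff_ne_empty.mpr hR
          have key : ∀ (i j : Nat), i < j → f^[i] u₀ = f^[j] u₀ → False := by
            intro i j hlt he
            have hw : f^[i] u₀ ∈ R := (hiter i u₀ hu₀).1
            have hrw : f^[j] u₀ = f^[j - i] (f^[i] u₀) := by
              rw [← Function.iterate_add_apply]
              congr 1
              omega
            have htg := (hiter (j - i) (f^[i] u₀) hw).2 (by omega)
            rw [← hrw, ← he] at htg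
            exact hnc ⟨f^[i] u₀, htg⟩
          obtain ⟨i, -, j, -, hij, heq2⟩ := Finset.exists_ne_map_eq_of_card_lt_of_maps_to
            (s := (Finset.univ : Finset (Fin (R.card + 1)))) (t := R)
            (by simp) (fun i _ => (hiter i.val u₀ hu₀).1)
          rcases lt_or_gt_of_ne hij with hlt | hlt
          · exact key i.val j.val hlt heq2
          · exact key j.val i.val hlt heq2.symm
        · rw [dif_neg h0]
          have hlt := Finset.card_lt_card
            (Finset.sdiff_ssubset Finset.sdiff_subset (Finset.nonempty_iff_ne_empty.mpr h0))
          exact ih _ (by omega)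
  intro R
  exact H R.card R le_rfl

theorem isADag_alt_iff (g : List (String × List String)) : isADag_alt g = true ↔ ¬ Cyc g := by
  constructor
  · intro ht
    unfold isADag_alt at ht
    refine peelB_sound _ ht ?_
    intro x hx
    rw [nodesB_eq_UF]
    obtain ⟨c, hxc, -⟩ := Relation.TransGen.head'_iff.mp hx
    exact (edg_univ hxc).1
  · intro hnc
    unfold isADag_alt
    exact peelB_complete hnc _

-- ===== VERDICT (by name: the statement is the Claim_ definition above) =====
theorem isADag_spec : Claim_equal_isADag := by
  intro g _
  unfold Spec_isADag
  by_cases h : Cyc g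
  · have ha : isADag g ≠ true := fun ht => (isADag_iff g).mp ht h
    have hb : isADag_alt g ≠ true := fun ht => (isADag_alt_iff g).mp ht h
    cases hA : isADag g <;> cases hB : isADag_alt g <;> simp_all
  · rw [(isADag_iff g).mpr h, (isADag_alt_iff g).mpr h]
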